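-- pv_equiv track=rewrite | github.com/finnmcnairy99/Fanduel-DFS-Optimizer | get_vegas.py | pick_bookmaker
-- ===== SOURCE A (Python) =====
-- PREFERRED_BOOKS = [
--     "DraftKings",
--     "FanDuel",
--     "Caesars",
--     "BetMGM",
--     "PointsBet",
-- ]
--
-- def pick_bookmaker(bookmakers):
--     """
--     Pick first available preferred bookmaker (by title), else fallback to first bookmaker.
--     """
--     if not bookmakers:
--         return None
--
--     for name in PREFERRED_BOOKS:
--         for b in bookmakers:
--             if b.get("title") == name:
--                 return b
--
--     return bookmakers[0]
-- ===== SOURCE B (Python) =====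
-- PREFERRED_BOOKS = [
--     "DraftKings",
--     "FanDuel",
--     "Caesars",
--     "BetMGM",
--     "PointsBet",
-- ]
--
-- def pick_bookmaker(bookmakers):
--     """
--     Pick first available preferred bookmaker (by title), else fallback to first bookmaker.
--     One pass builds a title -> bookmaker map (first occurrence wins), then the
--     preferred names are looked up in the map instead of re-scanning the list.
--     """
--     if not bookmakers:
--         return None
--     title_map = {}
--     for b in bookmakers:
--         t = b.get("title")
--         if t not in title_map:
--             title_map[t] = b
--     for name in PREFERRED_BOOKS:
--         if name in title_map:
--             return title_map[name]
--     return bookmakers[0]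
-- ===== Notes on version B (the rewrite author's own statement) =====
-- stated objective: idiomatic
-- what changed: Replaces the nested rescan (for each preferred name, scan all bookmakers) by a single indexing pass building a first-occurrence title->bookmaker dict, followed by constant lookups of the 5 preferred names.
import Mathlib
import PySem

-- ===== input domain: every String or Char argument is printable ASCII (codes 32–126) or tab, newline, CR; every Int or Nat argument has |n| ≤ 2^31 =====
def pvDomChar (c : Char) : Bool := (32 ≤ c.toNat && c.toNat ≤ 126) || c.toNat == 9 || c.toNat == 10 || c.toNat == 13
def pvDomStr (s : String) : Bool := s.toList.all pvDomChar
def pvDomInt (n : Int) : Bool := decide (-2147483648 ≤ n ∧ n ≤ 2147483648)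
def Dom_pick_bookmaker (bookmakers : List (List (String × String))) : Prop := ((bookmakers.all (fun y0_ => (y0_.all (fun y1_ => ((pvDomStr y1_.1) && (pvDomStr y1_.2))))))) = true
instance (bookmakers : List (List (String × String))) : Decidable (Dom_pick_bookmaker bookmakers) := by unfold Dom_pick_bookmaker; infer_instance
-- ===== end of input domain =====

-- B builds a first-occurrence title->bookmaker index in one pass, then looks up
-- the preferred names, instead of A's rescan of the whole list per preferred name.

-- ===== PORT A =====
def PREFERRED_BOOKS : List String :=
  ["DraftKings", "FanDuel", "Caesars", "BetMGM", "PointsBet"]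

-- b.get("title"): first-match lookup in the association list (dict convention)
def dget? : List (String × String) → String → Option String
  | [], _ => none
  | (k, v) :: rest, key => if k == key then some v else dget? rest key

-- A's inner loop: first bookmaker whose title equals `name`
def findByTitle (name : String) : List (List (String × String)) → Option (List (String × String))
  | [] => none
  | b :: rest => if dget? b "title" == some name then some b else findByTitle name rest

-- A's outer loop over PREFERRED_BOOKS
def loopPreferred (bookmakers : List (List (String × String))) : List String → Option (List (String × String))
  | [] => none
  | name :: rest =>
    match findByTitle name bookmakers with
    | some b => some b
    | none => loopPreferred bookmakers rest

def pick_bookmaker (bookmakers : List (List (String × String))) : Option (List (String × String)) :=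
  match bookmakers with
  | [] => none
  | first :: _ =>
    match loopPreferred bookmakers PREFERRED_BOOKS with
    | some b => some b
    | none => some first

-- ===== PORT B =====
-- the title map keyed by Option String (b.get may yield None)
def lookupO : List (Option String × List (String × String)) → Option String → Option (List (String × String))
  | [], _ => none
  | (k, v) :: rest, key => if k == key then some v else lookupO rest key

-- one step of B's indexing pass: insert only the first occurrence of each title
def mapStep (m : List (Option String × List (String × String))) (b : List (String × String)) :
    List (Option String × List (String × String)) :=
  let t := dget? b "title"
  if lookupO m t = none then m ++ [(t, b)] else m

def buildMap (bookmakers : List (List (String × String))) :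
    List (Option String × List (String × String)) :=
  bookmakers.foldl mapStep []

-- B's second loop: look the preferred names up in the map
def firstPref (m : List (Option String × List (String × String))) :
    List String → Option (List (String × String))
  | [] => none
  | name :: rest =>
    match lookupO m (some name) with
    | some b => some b
    | none => firstPref m rest

def pick_bookmaker_alt (bookmakers : List (List (String × String))) : Option (List (String × String)) :=
  match bookmakers with
  | [] => none
  | first :: _ =>
    match firstPref (buildMap bookmakers) PREFERRED_BOOKS with
    | some b => some b
    | none => some first

-- ===== PRECONDITION & SPEC =====
def Spec_pick_bookmaker (bookmakers : List (List (String × String))) (out : Option (List (String × String))) : Prop := out = pick_bookmaker_alt bookmakers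
instance (bookmakers : List (List (String × String))) (out : Option (List (String × String))) : Decidable (Spec_pick_bookmaker bookmakers out) := by unfold Spec_pick_bookmaker; infer_instance

-- ===== CLAIM (what is proved, stated in full; the proofs are below) =====
def Claim_equal_pick_bookmaker : Prop := ∀ (bookmakers : List (List (String × String))), Dom_pick_bookmaker bookmakers → Spec_pick_bookmaker bookmakers (pick_bookmaker bookmakers)

-- ===== LEMMAS AND PROOFS =====

-- first bookmaker whose (optional) title equals the key k
def findByKey (k : Option String) : List (List (String × String)) → Option (List (String × String))
  | [] => none
  | b :: rest => if dget? b "title" == k then some b else findByKey k rest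

lemma findByTitle_eq_findByKey (name : String) (bs : List (List (String × String))) :
    findByTitle name bs = findByKey (some name) bs := by
  induction bs with
  | nil => rfl
  | cons b rest ih => simp [findByTitle, findByKey, ih]

lemma lookupO_append (m : List (Option String × List (String × String)))
    (t k : Option String) (b : List (String × String)) :
    lookupO (m ++ [(t, b)]) k = (lookupO m k).or (if t == k then some b else none) := by
  induction m with
  | nil => simp [lookupO]
  | cons p rest ih =>
    obtain ⟨k', v⟩ := p
    by_cases h : k' == k
    · simp [lookupO, h]
    · simp [lookupO, h, ih]

lemma lookupO_foldl (bs : List (List (String × String)))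
    (m : List (Option String × List (String × String))) (k : Option String) :
    lookupO (bs.foldl mapStep m) k = (lookupO m k).or (findByKey k bs) := by
  induction bs generalizing m with
  | nil => simp [findByKey]
  | cons b rest ih =>
    simp only [List.foldl_cons, ih, findByKey, mapStep]
    by_cases ht : dget? b "title" == k
    · have hk : (dget? b "title") = k := by simpa using ht
      subst hk
      by_cases habs : lookupO m (dget? b "title") = none
      · simp [habs, lookupO_append]
      · obtain ⟨v, hv⟩ := Option.ne_none_iff_exists'.mp habs
        simp [hv]
    · by_cases habs : lookupO m (dget? b "title") = none
      · simp [habs, lookupO_append, ht]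
      · simp [habs, ht]

lemma lookupO_buildMap (bs : List (List (String × String))) (k : Option String) :
    lookupO (buildMap bs) k = findByKey k bs := by
  simp [buildMap, lookupO_foldl, lookupO]

lemma firstPref_eq_loopPreferred (bs : List (List (String × String))) (names : List String) :
    firstPref (buildMap bs) names = loopPreferred bs names := by
  induction names with
  | nil => rfl
  | cons n rest ih =>
    simp [firstPref, loopPreferred, lookupO_buildMap, findByTitle_eq_findByKey, ih]

-- ===== VERDICT (by name: the statement is the Claim_ definition above) =====
theorem pick_bookmaker_spec : Claim_equal_pick_bookmaker := by
  intro bookmakers _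
  unfold Spec_pick_bookmaker pick_bookmaker pick_bookmaker_alt
  cases bookmakers with
  | nil => rfl
  | cons first rest => rw [firstPref_eq_loopPreferred]
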